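-- pv_equiv track=rewrite | github.com/acepukas/gen-jsdoc-func-doc | ftplugin/gen-jsdoc-fn.py | genDoc
-- ===== SOURCE A (Python) =====
-- def genDoc(params):
--
--     lines = []
--     tabStopCnt = 1
--     top = '/**\n * ${%d:description}\n *' % (tabStopCnt)
--     lines.append(top)
--
--     if params:
--
--         for param in params:
--
--             tabStopCnt += 1
--             typ = param.get('type')
--             name = param.get('name')
--             vals = (tabStopCnt, typ, tabStopCnt + 1, name, tabStopCnt + 2)
--             line = ' * @param {${%d:%s}} ${%d:%s} ${%d:description}' % vals
--             lines.append(line)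
--             tabStopCnt += 2
--
--         lines.append(' *')
--
--     tabStopCnt += 1
--     vals = (tabStopCnt, tabStopCnt + 1, tabStopCnt + 2)
--     line = '${%d: * @return {${%d:void}} ${%d:description}}' % vals
--     lines.append(line)
--
--     lines.append(' */')
--     return '\n'.join(lines)
-- ===== SOURCE B (Python) =====
-- def _rec(ps, t):
--     # recursively build the @param block (each line newline-terminated) and the next tab stop
--     if not ps:
--         return ('', t)
--     p = ps[0]
--     line = ' * @param {${%d:%s}} ${%d:%s} ${%d:description}\n' % (
--         t, p.get('type'), t + 1, p.get('name'), t + 2)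
--     rest, t2 = _rec(ps[1:], t + 3)
--     return (line + rest, t2)
--
--
-- def genDoc(params):
--     # recursive string construction instead of a list of lines joined at the end
--     body, t = _rec(params, 2)
--     mid = ' *\n' if params else ''
--     ret = '${%d: * @return {${%d:void}} ${%d:description}}' % (t, t + 1, t + 2)
--     return '/**\n * ${1:description}\n *\n' + body + mid + ret + '\n */'
-- ===== Notes on version B (the rewrite author's own statement) =====
-- stated objective: alternative
-- what changed: Replaces A's imperative pass (mutable tabStopCnt, list.append, final '\n'.join) with a recursive helper that builds the @param block as a newline-terminated string directly and threads the next tab stop through the recursion; the result is assembled by plain string concatenation with no intermediate list of lines.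
import Mathlib
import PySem

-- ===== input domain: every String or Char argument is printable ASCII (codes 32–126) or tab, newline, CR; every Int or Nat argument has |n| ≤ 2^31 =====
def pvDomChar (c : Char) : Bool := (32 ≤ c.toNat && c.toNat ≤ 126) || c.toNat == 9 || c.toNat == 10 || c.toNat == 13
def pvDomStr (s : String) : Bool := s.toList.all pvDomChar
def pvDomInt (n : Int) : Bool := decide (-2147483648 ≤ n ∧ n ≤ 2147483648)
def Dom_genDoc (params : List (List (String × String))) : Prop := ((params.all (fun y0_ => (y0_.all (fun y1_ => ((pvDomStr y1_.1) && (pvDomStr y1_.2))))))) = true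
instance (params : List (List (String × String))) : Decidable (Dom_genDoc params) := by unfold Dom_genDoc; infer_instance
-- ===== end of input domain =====

-- B replaces A's mutable counter + list-of-lines + join pass with a recursive helper that
-- builds the @param block directly as a string and threads the next tab stop; same return value.

-- ===== PORT A =====
-- '%s' % None prints "None" in Python; dict.get returns None for a missing key
def pyFmtS (o : Option String) : String := o.getD "None"

def genDocStep (st : List String × Int) (param : List (String × String)) : List String × Int :=
  let t := st.2 + 1
  let typ := pyFmtS ((PySem.Dict.mk param).get? "type")
  let name := pyFmtS ((PySem.Dict.mk param).get? "name")
  let line := " * @param {${" ++ PySem.Int.toStr t ++ ":" ++ typ ++ "}} ${"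
      ++ PySem.Int.toStr (t + 1) ++ ":" ++ name ++ "} ${" ++ PySem.Int.toStr (t + 2) ++ ":description}"
  (st.1 ++ [line], t + 2)

def genDoc (params : List (List (String × String))) : String :=
  let lines : List String := ["/**\n * ${" ++ PySem.Int.toStr 1 ++ ":description}\n *"]
  let st :=
    if params ≠ [] then
      let st := params.foldl genDocStep (lines, (1 : Int))
      (st.1 ++ [" *"], st.2)
    else (lines, (1 : Int))
  let t := st.2 + 1
  let line := "${" ++ PySem.Int.toStr t ++ ": * @return {${" ++ PySem.Int.toStr (t + 1)
      ++ ":void}} ${" ++ PySem.Int.toStr (t + 2) ++ ":description}}"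
  PySem.Str.join "\n" (st.1 ++ [line, " */"])

-- ===== PORT B =====
-- recursive helper _rec of Source B: newline-terminated @param block plus the next tab stop
def genDocRec (ps : List (List (String × String))) (t : Int) : String × Int :=
  match ps with
  | [] => ("", t)
  | p :: rest =>
    let line := " * @param {${" ++ PySem.Int.toStr t ++ ":" ++ pyFmtS ((PySem.Dict.mk p).get? "type")
        ++ "}} ${" ++ PySem.Int.toStr (t + 1) ++ ":" ++ pyFmtS ((PySem.Dict.mk p).get? "name")
        ++ "} ${" ++ PySem.Int.toStr (t + 2) ++ ":description}\n"
    let r := genDocRec rest (t + 3)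
    (line ++ r.1, r.2)

def genDoc_alt (params : List (List (String × String))) : String :=
  let bt := genDocRec params 2
  let mid := if params ≠ [] then " *\n" else ""
  let ret := "${" ++ PySem.Int.toStr bt.2 ++ ": * @return {${" ++ PySem.Int.toStr (bt.2 + 1)
      ++ ":void}} ${" ++ PySem.Int.toStr (bt.2 + 2) ++ ":description}}"
  "/**\n * ${1:description}\n *\n" ++ bt.1 ++ mid ++ ret ++ "\n */"

-- ===== PRECONDITION & SPEC =====
def Spec_genDoc (params : List (List (String × String))) (out : String) : Prop := out = genDoc_alt params
instance (params : List (List (String × String))) (out : String) : Decidable (Spec_genDoc params out) := by unfold Spec_genDoc; infer_instance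

-- ===== CLAIM (what is proved, stated in full; the proofs are below) =====
def Claim_equal_genDoc : Prop := ∀ (params : List (List (String × String))), Dom_genDoc params → Spec_genDoc params (genDoc params)

-- ===== LEMMAS AND PROOFS =====

-- the @param line with tab stops t, t+1, t+2 (no trailing newline)
def lineAt (t : Int) (p : List (String × String)) : String :=
  " * @param {${" ++ PySem.Int.toStr t ++ ":" ++ pyFmtS ((PySem.Dict.mk p).get? "type")
    ++ "}} ${" ++ PySem.Int.toStr (t + 1) ++ ":" ++ pyFmtS ((PySem.Dict.mk p).get? "name")
    ++ "} ${" ++ PySem.Int.toStr (t + 2) ++ ":description}"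

-- A's param lines, starting at counter t (first line uses t+1)
def linesA (ps : List (List (String × String))) (t : Int) : List String :=
  match ps with
  | [] => []
  | p :: rest => lineAt (t + 1) p :: linesA rest (t + 3)

-- each line followed by a newline, concatenated
def catNl (L : List String) : String :=
  match L with
  | [] => ""
  | x :: xs => x ++ "\n" ++ catNl xs

theorem foldA_eq (ps : List (List (String × String))) :
    ∀ (ls : List String) (t : Int),
    ps.foldl genDocStep (ls, t) = (ls ++ linesA ps t, t + 3 * ps.length) := by
  induction ps with
  | nil => intro ls t; simp [linesA]
  | cons p rest ih =>
    intro ls t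
    have hstep : genDocStep (ls, t) p = (ls ++ [lineAt (t + 1) p], t + 1 + 2) := rfl
    rw [List.foldl_cons, hstep, ih, show ((t : Int) + 1 + 2) = t + 3 from by ring]
    simp [linesA]
    ring

theorem recB_line (t : Int) (p : List (String × String)) (s : String) :
    " * @param {${" ++ PySem.Int.toStr t ++ ":" ++ pyFmtS ((PySem.Dict.mk p).get? "type")
        ++ "}} ${" ++ PySem.Int.toStr (t + 1) ++ ":" ++ pyFmtS ((PySem.Dict.mk p).get? "name")
        ++ "} ${" ++ PySem.Int.toStr (t + 2) ++ ":description}\n" ++ s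
      = lineAt t p ++ "\n" ++ s := by
  rw [lineAt, show (":description}\n" : String) = ":description}" ++ "\n" from rfl]
  simp [String.append_assoc]

theorem recB_eq (ps : List (List (String × String))) :
    ∀ (t : Int), genDocRec ps (t + 1) = (catNl (linesA ps t), t + 1 + 3 * ps.length) := by
  induction ps with
  | nil => intro t; simp [genDocRec, linesA, catNl]
  | cons p rest ih =>
    intro t
    rw [genDocRec, show ((t : Int) + 1 + 3) = (t + 3) + 1 from by ring, ih]
    simp only [linesA, catNl, Prod.mk.injEq]
    refine ⟨recB_line (t + 1) p _, by simp only [List.length_cons]; push_cast; ring⟩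

theorem join_cons_ne (x : String) (xs : List String) (h : xs ≠ []) :
    PySem.Str.join "\n" (x :: xs) = x ++ "\n" ++ PySem.Str.join "\n" xs := by
  cases xs with
  | nil => exact absurd rfl h
  | cons y ys =>
    simp [PySem.Str.join, PySem.Chars.join, List.intercalate]
    apply String.ext
    simp [String.toList_ofList]

theorem join_single (x : String) : PySem.Str.join "\n" [x] = x := by
  simp [PySem.Str.join, PySem.Chars.join, List.intercalate]

theorem join_glue (L : List String) (y : String) (ys : List String) :
    PySem.Str.join "\n" (L ++ y :: ys) = catNl L ++ PySem.Str.join "\n" (y :: ys) := by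
  induction L with
  | nil => simp [catNl]
  | cons x xs ih =>
    rw [List.cons_append, join_cons_ne x (xs ++ y :: ys) (by simp), ih]
    simp [catNl, String.append_assoc]

theorem genDoc_eq_alt (params : List (List (String × String))) :
    genDoc params = genDoc_alt params := by
  cases params with
  | nil => decide
  | cons p ps =>
    have hA : genDoc (p :: ps)
        = PySem.Str.join "\n"
            ((("/**\n * ${" ++ PySem.Int.toStr 1 ++ ":description}\n *") :: linesA (p :: ps) 1 ++ [" *"])
              ++ [ "${" ++ PySem.Int.toStr (1 + 3 * ((p :: ps).length : Int) + 1) ++ ": * @return {${"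
                    ++ PySem.Int.toStr (1 + 3 * ((p :: ps).length : Int) + 1 + 1)
                    ++ ":void}} ${" ++ PySem.Int.toStr (1 + 3 * ((p :: ps).length : Int) + 1 + 2)
                    ++ ":description}}", " */"]) := by
      show PySem.Str.join "\n" ((((p :: ps).foldl genDocStep _).1 ++ [" *"]) ++ _) = _
      rw [foldA_eq (p :: ps) _ 1]
      rfl
    have hB : genDoc_alt (p :: ps)
        = "/**\n * ${1:description}\n *\n" ++ catNl (linesA (p :: ps) 1) ++ " *\n"
            ++ ("${" ++ PySem.Int.toStr (1 + 1 + 3 * ((p :: ps).length : Int)) ++ ": * @return {${"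
                  ++ PySem.Int.toStr (1 + 1 + 3 * ((p :: ps).length : Int) + 1)
                  ++ ":void}} ${" ++ PySem.Int.toStr (1 + 1 + 3 * ((p :: ps).length : Int) + 2)
                  ++ ":description}}") ++ "\n */" := by
      unfold genDoc_alt
      rw [show (2 : Int) = 1 + 1 from rfl, recB_eq (p :: ps) 1]
      simp [String.append_assoc]
    rw [hA, hB]
    rw [show PySem.Int.toStr 1 = "1" from rfl]
    simp only [List.cons_append, List.append_assoc, List.nil_append]
    rw [join_cons_ne _ _ (by simp), join_glue, join_cons_ne _ _ (by simp),
        join_cons_ne _ _ (by simp), join_single]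
    rw [show (1 + 3 * ((p :: ps).length : Int) + 1) = 1 + 1 + 3 * ((p :: ps).length : Int) from by ring]
    rw [show "/**\n * ${1:description}\n *\n" = ("/**\n * ${" ++ "1" ++ ":description}\n *") ++ "\n" from rfl,
        show " *\n" = " *" ++ "\n" from rfl,
        show "\n */" = "\n" ++ " */" from rfl]
    simp [String.append_assoc]

-- ===== VERDICT (by name: the statement is the Claim_ definition above) =====
theorem genDoc_spec : Claim_equal_genDoc := by
  intro params _
  exact genDoc_eq_alt params
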